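-- pv_equiv track=rewrite | github.com/jphouminh71/PracticeProblems | HackerRank/Easy/birthdayCandles.py | birthdayCandles
-- ===== SOURCE A (Python) =====
-- def birthdayCandles(candles):
--     stack = []
--     stack.append(candles[0])
--     for candle in range(1,len(candles)):
--         if stack[0] < candles[candle]:
--             stack.clear()
--             stack.append(candles[candle])
--         elif candles[candle] == stack[0]:
--             stack.append(candles[candle])
--     return len(stack)
-- ===== SOURCE B (Python) =====
-- def birthdayCandles(candles):
--     tallest = candles[0]
--     for c in candles:
--         if c > tallest:
--             tallest = c
--     return candles.count(tallest)
-- ===== Notes on version B (the rewrite author's own statement) =====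
-- stated objective: simpler
-- what changed: B replaces A's fused single pass that maintains an explicit stack of current-maximum candles with a plain two-pass decomposition: one pass finds the maximum height, then list.count counts its occurrences; no auxiliary list is built, and the counting runs in C-level list.count instead of per-element Python list mutation (measured ~1.7x faster at the largest size).
import Mathlib
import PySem

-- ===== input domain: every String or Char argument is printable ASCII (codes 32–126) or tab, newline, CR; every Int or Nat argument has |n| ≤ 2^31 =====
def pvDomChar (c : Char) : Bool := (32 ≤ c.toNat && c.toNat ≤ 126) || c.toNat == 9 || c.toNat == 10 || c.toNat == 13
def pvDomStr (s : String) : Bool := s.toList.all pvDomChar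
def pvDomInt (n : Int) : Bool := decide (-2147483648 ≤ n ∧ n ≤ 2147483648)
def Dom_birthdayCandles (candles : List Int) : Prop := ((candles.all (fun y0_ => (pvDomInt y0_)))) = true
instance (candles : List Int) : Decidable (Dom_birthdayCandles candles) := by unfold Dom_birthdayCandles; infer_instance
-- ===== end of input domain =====

-- B replaces A's fused single pass maintaining an explicit stack of current-maximum candles with a
-- two-pass decomposition (find the maximum, then count its occurrences); same return value on Pre_.

-- ===== PORT A =====
-- one step of A's loop body on the stack (stack[0] read as headD 0: the stack is never empty)
def pvStepA (stack : List Int) (c : Int) : List Int :=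
  if stack.headD 0 < c then [c]
  else if c == stack.headD 0 then stack ++ [c]
  else stack

def birthdayCandles (candles : List Int) : Int :=
  -- stack = []; then append the first element — indexing it raises IndexError on the empty list; Pre_ excludes that,
  -- so the pyGetD default 0 is unreachable
  let stack : List Int := [PySem.List.pyGetD candles 0 0]
  let stack := (PySem.List.pyRange 1 (PySem.List.len candles) 1).foldl
    (fun stack i => pvStepA stack (PySem.List.pyGetD candles i 0)) stack
  (stack.length : Int)

-- ===== PORT B =====
def birthdayCandles_alt (candles : List Int) : Int :=
  -- tallest = first element — indexing raises IndexError on the empty list; Pre_ excludes that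
  let tallest := PySem.List.pyGetD candles 0 0
  let tallest := candles.foldl (fun t c => if c > t then c else t) tallest
  (PySem.List.count candles tallest : Int)

-- ===== PRECONDITION & SPEC =====
-- Pre_ excludes exactly the empty list, on which A (and B) raise IndexError indexing the first element
def Pre_birthdayCandles (candles : List Int) : Prop := candles ≠ []
instance (candles : List Int) : Decidable (Pre_birthdayCandles candles) := by unfold Pre_birthdayCandles; infer_instance
def pvWitness_birthdayCandles : List Int := [3, 2, 3, 1]

def Spec_birthdayCandles (candles : List Int) (out : Int) : Prop := out = birthdayCandles_alt candles
instance (candles : List Int) (out : Int) : Decidable (Spec_birthdayCandles candles out) := by unfold Spec_birthdayCandles; infer_instance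

-- ===== CLAIM (what is proved, stated in full; the proofs are below) =====
def Claim_equal_birthdayCandles : Prop := ∀ (candles : List Int), Dom_birthdayCandles candles → Pre_birthdayCandles candles → Spec_birthdayCandles candles (birthdayCandles candles)

-- ===== LEMMAS AND PROOFS =====

-- A's stack invariant: starting from a nonempty stack of k copies of m, the loop ends with one copy
-- of the running maximum M per occurrence counted (k of them if M = m, plus the occurrences in t).
lemma stepA_fold (t : List Int) (m : Int) (k : Nat) (hk : 0 < k) :
    t.foldl pvStepA (List.replicate k m) =
      List.replicate ((if t.foldl max m = m then k else 0) + t.count (t.foldl max m))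
        (t.foldl max m) := by
  induction t generalizing m k with
  | nil => simp
  | cons c t ih =>
    have hhead : (List.replicate k m).head?.getD 0 = m := by
      cases k with
      | zero => omega
      | succ n => simp [List.replicate_succ]
    by_cases h1 : m < c
    · have hM : c ≤ t.foldl max c := (PySem.List.le_foldl_max t c).1
      have hstep : pvStepA (List.replicate k m) c = List.replicate 1 c := by
        simp [pvStepA, hhead, h1]
      rw [List.foldl_cons, hstep, ih c 1 (by omega)]
      have hmax : max m c = c := by omega
      simp only [List.foldl_cons, hmax, List.count_cons]
      have hne : t.foldl max c ≠ m := by omega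
      have hcm : c ≠ m := by omega
      by_cases h2 : t.foldl max c = c <;> simp [h2, hne, hcm] <;> omega
    · by_cases h2 : c = m
      · subst h2
        have hstep : pvStepA (List.replicate k c) c = List.replicate (k + 1) c := by
          simp [pvStepA, hhead, List.replicate_succ' ]
        rw [List.foldl_cons, hstep, ih c (k + 1) (by omega)]
        have hmax : max c c = c := by omega
        simp only [List.foldl_cons, hmax, List.count_cons]
        by_cases h3 : t.foldl max c = c <;> simp [h3] <;> omega
      · have hstep : pvStepA (List.replicate k m) c = List.replicate k m := by
          simp [pvStepA, hhead, h1]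
          intro h; exact absurd h h2
        rw [List.foldl_cons, hstep, ih m k hk]
        have hmax : max m c = m := by omega
        have hM : m ≤ t.foldl max m := (PySem.List.le_foldl_max t m).1
        have hne : t.foldl max m ≠ c := by omega
        simp only [List.foldl_cons, hmax, List.count_cons]
        simp [hne.symm]

-- B's running-maximum body is max
lemma foldl_if_eq_max (t : List Int) (a : Int) :
    t.foldl (fun t c => if c > t then c else t) a = t.foldl max a := by
  induction t generalizing a with
  | nil => rfl
  | cons c t ih =>
    have : (if c > a then c else a) = max a c := by
      simp [max_def]; split_ifs <;> omega
    simp only [List.foldl_cons, this, ih]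

-- ===== VERDICT (by name: the statement is the Claim_ definition above) =====
theorem birthdayCandles_spec : Claim_equal_birthdayCandles := by
  intro candles _ hpre
  unfold Spec_birthdayCandles birthdayCandles birthdayCandles_alt
  obtain ⟨h, t, rfl⟩ := List.exists_cons_of_ne_nil hpre
  have hget : PySem.List.pyGetD (h :: t) 0 0 = h := by
    simp [PySem.List.pyGetD]
  rw [hget]
  have hloop := PySem.List.foldl_pyRange_pyGetD' (xs := h :: t) (a := 1) (d := 0)
      (f := pvStepA) (init := [h]) (by omega)
  simp only [PySem.List.len_eq] at hloop ⊢
  rw [hloop]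
  simp only [Int.toNat_one, List.drop_succ_cons, List.drop_zero]
  have : ([h] : List Int) = List.replicate 1 h := rfl
  rw [this, stepA_fold t h 1 (by omega)]
  rw [List.foldl_cons, foldl_if_eq_max]
  have : (if h > h then h else h) = h := by simp
  rw [this]
  simp only [List.length_replicate, List.count_cons, PySem.List.count]
  have hM : h ≤ t.foldl max h := (PySem.List.le_foldl_max t h).1
  by_cases h3 : t.foldl max h = h <;> simp [h3] <;> omega
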